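-- pv_equiv track=rewrite | github.com/Retkoj/AOC_2020 | src/7_1_unique_possible_outer_bags.py | loop_exhaustive_outer
-- ===== SOURCE A (Python) =====
-- from typing import List
--
-- def get_outer_bags(bag_requirements: dict, current_inner_bag: str) -> List:
--     """
--     Get outer bags that can contain the current inner bag
--     :param bag_requirements: Dict of bag requirements
--     :param current_inner_bag: String with current inner bag's color
--     :return: List of outer bags that can contain current_target_bag
--     """
--     return [color for color, sub_bags in bag_requirements.items() if sub_bags.get(current_inner_bag, False)]
--
-- def loop_exhaustive_outer(bag_requirements: dict, target_bag: str) -> List: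
--     """
--     Goal of the challenge: How many outer bags could contain the target bag (shiny_gold in case of day 7_1)?
--
--     Current function finds all direct outer bags for the target bag
--     Then treat all found outer bags as target bags themselves and list their respective outer bags.
--     Script stops if none of the outer bags have any outer bags themselves.
--
--     :param bag_requirements: Dict of bag requirements
--     :param target_bag: String with the color of the inner bag in questions (shiny_gold in case of day 7_1)
--     :return: List of all found outer bags (may contain duplicates)
--     """
--     final_list = []
--     not_exhausted = True
--     current_list = get_outer_bags(bag_requirements, target_bag)
--     while not_exhausted:
--         final_list += current_list
--         tmp_list = []
--         for bag in current_list: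
--             tmp_list += get_outer_bags(bag_requirements, bag)
--         current_list = tmp_list
--         if len(current_list) == 0:
--             not_exhausted = False
--     return final_list
-- ===== SOURCE B (Python) =====
-- def loop_exhaustive_outer(bag_requirements: dict, target_bag: str):
--     """Worklist pass: build a reverse index once, then grow a single output list
--     in place, reading it with a cursor; each emitted bag appends its direct outer
--     bags to the end of the same list (no level lists, no rescans of the dict)."""
--     index = {}
--     for color, sub_bags in bag_requirements.items():
--         for inner, count in sub_bags.items():
--             if count:
--                 index.setdefault(inner, []).append(color)
--     result = list(index.get(target_bag, []))
--     i = 0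
--     while i < len(result):
--         result += index.get(result[i], [])
--         i += 1
--     return result
-- ===== Notes on version B (the rewrite author's own statement) =====
-- stated objective: faster
-- what changed: B builds a reverse adjacency index once and then runs a single worklist pass: the output list itself is the queue, read through a cursor, each emitted bag appending its direct outer bags at the end - instead of A's level-by-level expansion that rescans the whole requirements dict for every emitted bag.
import Mathlib
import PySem

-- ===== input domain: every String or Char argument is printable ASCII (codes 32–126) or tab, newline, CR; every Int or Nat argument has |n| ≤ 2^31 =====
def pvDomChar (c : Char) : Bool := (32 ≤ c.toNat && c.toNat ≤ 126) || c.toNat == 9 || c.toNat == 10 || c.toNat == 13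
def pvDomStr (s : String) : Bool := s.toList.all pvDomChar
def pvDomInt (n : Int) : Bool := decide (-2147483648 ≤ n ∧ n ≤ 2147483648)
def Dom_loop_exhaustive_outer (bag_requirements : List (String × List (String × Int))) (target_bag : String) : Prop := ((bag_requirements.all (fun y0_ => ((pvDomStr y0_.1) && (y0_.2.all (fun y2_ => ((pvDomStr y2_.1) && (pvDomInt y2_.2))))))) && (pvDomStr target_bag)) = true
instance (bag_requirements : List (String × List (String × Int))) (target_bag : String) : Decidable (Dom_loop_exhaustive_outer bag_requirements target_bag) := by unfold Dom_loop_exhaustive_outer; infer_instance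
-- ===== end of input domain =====

-- B replaces A's level-by-level expansion (rescanning the whole dict per emitted bag) by a
-- single worklist pass over one growing output list, read through a cursor, with a reverse
-- index built once; same output, duplicates included.

-- ===== PORT A =====
-- [color for color, sub_bags in bag_requirements.items() if sub_bags.get(current_inner_bag, False)]
def getOuterBags (bag_requirements : List (String × List (String × Int))) (current_inner_bag : String) : List String :=
  (bag_requirements.filter (fun p => ((PySem.Dict.mk p.2).getD current_inner_bag 0) != 0)).map Prod.fst

-- A's while loop; the fuel only bounds the iteration count, which under Pre_ (acyclic
-- reachable part) never exceeds bag_requirements.length + 1, so the loop always exits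
-- via its own emptiness test there.
def pyLoopA (br : List (String × List (String × Int))) : Nat → List String → List String → List String
  | 0, finalList, _ => finalList
  | fuel+1, finalList, currentList =>
    let finalList := finalList ++ currentList
    let tmp := currentList.foldl (fun acc bag => acc ++ getOuterBags br bag) []
    if tmp.length == 0 then finalList else pyLoopA br fuel finalList tmp

def loop_exhaustive_outer (bag_requirements : List (String × List (String × Int))) (target_bag : String) : List String :=
  pyLoopA bag_requirements (bag_requirements.length + 1) [] (getOuterBags bag_requirements target_bag)

-- ===== PORT B =====
-- index.setdefault(inner, []).append(color) for every truthy (inner, count) of every (color, sub_bags)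
def buildIndex (bag_requirements : List (String × List (String × Int))) : PySem.Dict String (List String) :=
  bag_requirements.foldl
    (fun idx p =>
      p.2.foldl (fun d q => if q.2 != 0 then d.modify q.1 [] (· ++ [p.1]) else d) idx)
    PySem.Dict.empty

-- B's 'while i < len(result)' cursor loop; the fuel only bounds the number of processed
-- items, which under Pre_ (acyclic reachable part) stays below (V+1)^(V+3), V = |br|,
-- so the loop always exits via its own cursor test there.
def pyLoopB (idx : PySem.Dict String (List String)) : Nat → List String → Nat → List String
  | 0, res, _ => res
  | fuel+1, res, i =>
    if h : i < res.length then
      pyLoopB idx fuel (res ++ idx.getD (res[i]'h) []) (i + 1)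
    else res

def loop_exhaustive_outer_alt (bag_requirements : List (String × List (String × Int))) (target_bag : String) : List String :=
  let idx := buildIndex bag_requirements
  pyLoopB idx ((bag_requirements.length + 1) ^ (bag_requirements.length + 3)) (idx.getD target_bag []) 0

-- ===== PRECONDITION & SPEC =====
-- helpers for Pre_: one step of the reverse 'is contained in' relation, and its bounded
-- (hence decidable) transitive closure — a standard closed-form acyclicity statement,
-- not a copy of either port's collection order.
def pvStepC (br : List (String × List (String × Int))) (S : List String) : List String :=
  (br.filter (fun p => S.any (fun b => ((PySem.Dict.mk p.2).getD b 0) != 0))).map Prod.fst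
def pvGrowC (br : List (String × List (String × Int))) (S : List String) : List String :=
  PySem.Set.update S (pvStepC br S)
def pvClosureC (br : List (String × List (String × Int))) (S : List String) : List String :=
  (pvGrowC br)^[br.length + 1] S

-- Pre_ excludes (a) association lists with duplicate outer or inner keys, which do not
-- represent a Python dict (the Python argument is a dict, last value winning), and
-- (b) inputs whose bag-containment graph has a cycle reachable from the target bag,
-- on which Python A's while loop never terminates.
def Pre_loop_exhaustive_outer (bag_requirements : List (String × List (String × Int))) (target_bag : String) : Prop :=
  (bag_requirements.map Prod.fst).Nodup ∧
  (∀ p ∈ bag_requirements, (p.2.map Prod.fst).Nodup) ∧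
  (∀ c ∈ pvClosureC bag_requirements (pvStepC bag_requirements [target_bag]),
     c ∉ pvClosureC bag_requirements (pvStepC bag_requirements [c]))

instance (bag_requirements : List (String × List (String × Int))) (target_bag : String) : Decidable (Pre_loop_exhaustive_outer bag_requirements target_bag) := by
  unfold Pre_loop_exhaustive_outer; infer_instance

def pvWitness_loop_exhaustive_outer : (List (String × List (String × Int))) × String :=
  ([("bright red", [("shiny gold", 1)]), ("muted yellow", [("bright red", 2), ("faded blue", 0)])], "shiny gold")

def Spec_loop_exhaustive_outer (bag_requirements : List (String × List (String × Int))) (target_bag : String) (out : List String) : Prop := out = loop_exhaustive_outer_alt bag_requirements target_bag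
instance (bag_requirements : List (String × List (String × Int))) (target_bag : String) (out : List String) : Decidable (Spec_loop_exhaustive_outer bag_requirements target_bag out) := by unfold Spec_loop_exhaustive_outer; infer_instance

-- ===== CLAIM (what is proved, stated in full; the proofs are below) =====
def Claim_equal_loop_exhaustive_outer : Prop := ∀ (bag_requirements : List (String × List (String × Int))) (target_bag : String), Dom_loop_exhaustive_outer bag_requirements target_bag → Pre_loop_exhaustive_outer bag_requirements target_bag → Spec_loop_exhaustive_outer bag_requirements target_bag (loop_exhaustive_outer bag_requirements target_bag)

-- ===== LEMMAS AND PROOFS =====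

-- ---------- reading the reverse index back ----------

-- one color's inner loop of buildIndex, read back at key b (first-match semantics needs Nodup inner keys)
theorem innerGetD (c : String) : ∀ (subs : List (String × Int)) (idx : PySem.Dict String (List String)) (b : String),
    (subs.map Prod.fst).Nodup →
    (subs.foldl (fun d q => if q.2 != 0 then d.modify q.1 [] (· ++ [c]) else d) idx).getD b []
      = idx.getD b [] ++ (if ((PySem.Dict.mk subs).getD b 0) != 0 then [c] else []) := by
  intro subs
  induction subs with
  | nil =>
    intro idx b _
    simp [PySem.Dict.getD_eq_get?_getD, PySem.Dict.get?]
  | cons q rest ih =>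
    intro idx b hnd
    obtain ⟨k, v⟩ := q
    simp only [List.map_cons, List.nodup_cons] at hnd
    simp only [List.foldl_cons]
    rw [ih _ b hnd.2]
    by_cases hkb : k = b
    · subst hkb
      have hget : (PySem.Dict.mk rest).getD k 0 = 0 := by
        apply PySem.Dict.getD_of_get?_eq_none
        rw [PySem.Dict.get?_eq_none_iff_not_mem_keys]
        simpa [PySem.Dict.keys] using hnd.1
      have hcons : (PySem.Dict.mk ((k, v) :: rest)).getD k 0 = v := by
        rw [PySem.Dict.getD_eq_get?_getD, PySem.Dict.get?_mk_cons]; simp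
      rw [hget, hcons]
      by_cases hv : v = 0
      · simp [hv]
      · have hv' : (v != 0) = true := by simp [hv]
        simp [hv', PySem.Dict.getD_modify_self]
    · have hcons : (PySem.Dict.mk ((k, v) :: rest)).getD b 0 = (PySem.Dict.mk rest).getD b 0 := by
        rw [PySem.Dict.getD_eq_get?_getD, PySem.Dict.get?_mk_cons, PySem.Dict.getD_eq_get?_getD]
        simp [hkb]
      rw [hcons]
      by_cases hv : v = 0
      · simp [hv]
      · have hv' : (v != 0) = true := by simp [hv]
        simp only [hv', if_true]
        rw [PySem.Dict.getD_modify_of_ne]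
        exact fun hh => hkb hh.symm

-- reading buildIndex's fold back at any key gives exactly A's full scan
theorem outerGetD : ∀ (br : List (String × List (String × Int))) (idx : PySem.Dict String (List String)) (b : String),
    (∀ p ∈ br, (p.2.map Prod.fst).Nodup) →
    (br.foldl (fun idx p => p.2.foldl (fun d q => if q.2 != 0 then d.modify q.1 [] (· ++ [p.1]) else d) idx) idx).getD b []
      = idx.getD b [] ++ getOuterBags br b := by
  intro br
  induction br with
  | nil => intro idx b _; simp [getOuterBags]
  | cons p rest ih =>
    intro idx b h
    simp only [List.foldl_cons]
    rw [ih _ b (fun q hq => h q (List.mem_cons_of_mem _ hq))]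
    rw [innerGetD p.1 p.2 idx b (h p List.mem_cons_self)]
    simp only [getOuterBags, List.filter_cons]
    by_cases hc : ((PySem.Dict.mk p.2).getD b 0 != 0) = true
    · simp [hc, List.append_assoc]
    · simp [hc]

theorem buildIndex_getD (br : List (String × List (String × Int))) (b : String)
    (h : ∀ p ∈ br, (p.2.map Prod.fst).Nodup) :
    (buildIndex br).getD b [] = getOuterBags br b := by
  unfold buildIndex
  rw [outerGetD br PySem.Dict.empty b h, PySem.Dict.getD_empty]
  simp

-- ---------- functional views of the two loops ----------

-- everything B's cursor loop ever appends after the pending suffix, one item per fuel unit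
def appended (g : String → List String) : Nat → List String → List String
  | 0, _ => []
  | _+1, [] => []
  | fuel+1, b :: p => g b ++ appended g fuel (p ++ g b)

-- A's output after the already-emitted prefix: concatenated levels, one level per fuel unit
def levcat (g : String → List String) : Nat → List String → List String
  | 0, _ => []
  | fuel+1, cur => cur ++ (if (cur.flatMap g).length == 0 then [] else levcat g fuel (cur.flatMap g))

-- total number of items B processes in m levels (fuel bookkeeping)
def totalLen (g : String → List String) : Nat → List String → Nat
  | 0, _ => 0
  | m+1, cur => cur.length + totalLen g m (cur.flatMap g)

theorem appended_nil (g : String → List String) (f : Nat) : appended g f [] = [] := by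
  cases f <;> rfl

theorem levcat_nil (g : String → List String) (f : Nat) : levcat g f [] = [] := by
  cases f <;> simp [levcat]

theorem pyLoopA_eq_levcat (br : List (String × List (String × Int))) :
    ∀ (fuel : Nat) (out cur : List String),
      pyLoopA br fuel out cur = out ++ levcat (getOuterBags br) fuel cur := by
  intro fuel
  induction fuel with
  | zero => intro out cur; simp [pyLoopA, levcat]
  | succ n ih =>
    intro out cur
    by_cases h : ((cur.flatMap (getOuterBags br)).length == 0) = true
    · simp only [pyLoopA, levcat, PySem.List.foldl_append_eq_flatMap, List.nil_append, h,
        if_true, List.append_nil]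
    · simp only [pyLoopA, levcat, PySem.List.foldl_append_eq_flatMap, List.nil_append, h,
        Bool.false_eq_true, if_false, ih, List.append_assoc]

theorem pyLoopB_eq_appended (idx : PySem.Dict String (List String)) :
    ∀ (fuel : Nat) (res : List String) (i : Nat),
      pyLoopB idx fuel res i = res ++ appended (fun b => idx.getD b []) fuel (res.drop i) := by
  intro fuel
  induction fuel with
  | zero => intro res i; simp [pyLoopB, appended]
  | succ n ih =>
    intro res i
    simp only [pyLoopB]
    split
    · next h =>
      rw [ih, List.drop_eq_getElem_cons h,
          List.drop_append_of_le_length (by omega : i + 1 ≤ res.length)]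
      simp [appended, List.append_assoc]
    · next h =>
      rw [List.drop_eq_nil_of_le (by omega : res.length ≤ i), appended_nil, List.append_nil]

theorem appended_shift (g : String → List String) :
    ∀ (q : List String) (f : Nat) (r : List String),
      appended g (q.length + f) (q ++ r) = q.flatMap g ++ appended g f (r ++ q.flatMap g) := by
  intro q
  induction q with
  | nil => intro f r; simp
  | cons b q' ih =>
    intro f r
    have hfu : q'.length + 1 + f = (q'.length + f) + 1 := by omega
    simp only [List.length_cons, List.cons_append, hfu, appended, List.flatMap_cons]
    rw [show q' ++ r ++ g b = q' ++ (r ++ g b) from List.append_assoc q' r (g b)]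
    rw [ih f (r ++ g b)]
    simp [List.append_assoc]

-- the two views agree as soon as the levels die out within the fuel
theorem appended_eq_levcat (g : String → List String) :
    ∀ (m fa fb : Nat) (cur : List String),
      (fun s => s.flatMap g)^[m] cur = [] → m ≤ fa → totalLen g m cur ≤ fb →
      cur ++ appended g fb cur = levcat g fa cur := by
  intro m
  induction m with
  | zero =>
    intro fa fb cur h _ _
    simp only [Function.iterate_zero, id] at h
    subst h
    simp [appended_nil, levcat_nil]
  | succ m ih =>
    intro fa fb cur h hm hb
    cases fa with
    | zero => omega
    | succ fa' =>
      simp only [totalLen] at hb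
      have hsh := appended_shift g cur (fb - cur.length) []
      rw [List.append_nil, List.nil_append,
          (by omega : cur.length + (fb - cur.length) = fb)] at hsh
      rw [hsh]
      simp only [levcat]
      by_cases hN : ((cur.flatMap g).length == 0) = true
      · have hnil : cur.flatMap g = [] := List.length_eq_zero_iff.mp (eq_of_beq hN)
        rw [hnil]
        simp [appended_nil]
      · simp only [hN, Bool.false_eq_true, if_false]
        have hit : (fun s => List.flatMap g s)^[m] (cur.flatMap g) = [] := by
          rw [← Function.iterate_succ_apply]
          exact h
        have hrec := ih fa' (fb - cur.length) (cur.flatMap g) hit (by omega) (by omega)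
        rw [← hrec]

-- ---------- size bounds (fuel sufficiency for B) ----------

theorem flatMap_len_le (br : List (String × List (String × Int))) (cur : List String) :
    (cur.flatMap (getOuterBags br)).length ≤ cur.length * br.length := by
  induction cur with
  | nil => simp
  | cons b q ih =>
    have hb : (getOuterBags br b).length ≤ br.length := by
      unfold getOuterBags
      simpa using List.length_filter_le _ br
    simp only [List.flatMap_cons, List.length_append, List.length_cons, Nat.succ_mul]
    omega

theorem totalLen_le (br : List (String × List (String × Int))) :
    ∀ (m : Nat) (cur : List String),
      totalLen (getOuterBags br) m cur ≤ m * cur.length * (br.length + 1) ^ m := by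
  intro m
  induction m with
  | zero => intro cur; simp [totalLen]
  | succ m ih =>
    intro cur
    have hN : (cur.flatMap (getOuterBags br)).length ≤ cur.length * (br.length + 1) :=
      le_trans (flatMap_len_le br cur) (Nat.mul_le_mul_left _ (by omega))
    have h1 := ih (cur.flatMap (getOuterBags br))
    have h2 : m * (cur.flatMap (getOuterBags br)).length * (br.length + 1) ^ m
        ≤ m * cur.length * (br.length + 1) ^ (m + 1) := by
      calc m * (cur.flatMap (getOuterBags br)).length * (br.length + 1) ^ m
          ≤ m * (cur.length * (br.length + 1)) * (br.length + 1) ^ m :=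
            Nat.mul_le_mul_right _ (Nat.mul_le_mul_left _ hN)
        _ = m * cur.length * (br.length + 1) ^ (m + 1) := by ring
    have h3 : cur.length ≤ cur.length * (br.length + 1) ^ (m + 1) :=
      Nat.le_mul_of_pos_right _ (Nat.pow_pos (by omega))
    simp only [totalLen]
    calc cur.length + totalLen (getOuterBags br) m (cur.flatMap (getOuterBags br))
        ≤ cur.length * (br.length + 1) ^ (m + 1) + m * cur.length * (br.length + 1) ^ (m + 1) := by
          omega
      _ = (m + 1) * cur.length * (br.length + 1) ^ (m + 1) := by ring

-- ---------- termination: acyclicity kills the levels within |br|+1 steps ----------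

def RelOut (br : List (String × List (String × Int))) (a b : String) : Prop := b ∈ getOuterBags br a

-- b is reachable upward from a (closed-form closure of the reverse containment step)
def RelC (br : List (String × List (String × Int))) (a b : String) : Prop :=
  b ∈ pvClosureC br (getOuterBags br a)

theorem step_singleton (br : List (String × List (String × Int))) (b : String) :
    pvStepC br [b] = getOuterBags br b := by
  unfold pvStepC getOuterBags
  simp

-- L1/L2
theorem step_subset_keys (br : List (String × List (String × Int))) (S : List String) :
    pvStepC br S ⊆ br.map Prod.fst := by
  unfold pvStepC
  intro x hx
  rw [List.mem_map] at hx
  obtain ⟨p, hp, rfl⟩ := hx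
  exact List.mem_map_of_mem (List.mem_of_mem_filter hp)

theorem g_subset_keys (br : List (String × List (String × Int))) (b : String) :
    getOuterBags br b ⊆ br.map Prod.fst := by
  rw [← step_singleton]; exact step_subset_keys br [b]

theorem g_sublist_keys (br : List (String × List (String × Int))) (b : String) :
    (getOuterBags br b).Sublist (br.map Prod.fst) :=
  List.Sublist.map Prod.fst List.filter_sublist

-- L3
theorem step_mono (br : List (String × List (String × Int))) {S T : List String} (h : S ⊆ T) :
    pvStepC br S ⊆ pvStepC br T := by
  unfold pvStepC
  apply List.map_subset
  intro p hp
  rw [List.mem_filter] at hp ⊢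
  refine ⟨hp.1, ?_⟩
  rw [List.any_eq_true] at hp ⊢
  obtain ⟨b, hb, hbv⟩ := hp.2
  exact ⟨b, h hb, hbv⟩

-- L5/L6
theorem subset_grow (br : List (String × List (String × Int))) (S : List String) :
    S ⊆ pvGrowC br S := fun _ hx => (PySem.Set.mem_update _ _ _).mpr (Or.inl hx)

theorem step_sub_grow (br : List (String × List (String × Int))) (S : List String) :
    pvStepC br S ⊆ pvGrowC br S := fun _ hx => (PySem.Set.mem_update _ _ _).mpr (Or.inr hx)

theorem subset_iterate (br : List (String × List (String × Int))) (S : List String) :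
    ∀ k, S ⊆ (pvGrowC br)^[k] S := by
  intro k
  induction k with
  | zero => simp
  | succ k ih =>
    rw [Function.iterate_succ_apply']
    exact fun x hx => subset_grow br _ (ih hx)

theorem closure_seed (br : List (String × List (String × Int))) (S : List String) :
    S ⊆ pvClosureC br S := subset_iterate br S _

-- invariants
theorem grow_nodup (br : List (String × List (String × Int))) {S : List String} (h : S.Nodup) :
    (pvGrowC br S).Nodup := PySem.Set.nodup_update _ _ h

theorem grow_sub_keys (br : List (String × List (String × Int))) {S : List String}
    (h : S ⊆ br.map Prod.fst) : pvGrowC br S ⊆ br.map Prod.fst := by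
  intro x hx
  rcases (PySem.Set.mem_update _ _ _).mp hx with hx | hx
  · exact h hx
  · exact step_subset_keys br S hx

theorem iter_nodup (br : List (String × List (String × Int))) {S : List String} (h : S.Nodup) :
    ∀ k, ((pvGrowC br)^[k] S).Nodup := by
  intro k
  induction k with
  | zero => simpa
  | succ k ih => rw [Function.iterate_succ_apply']; exact grow_nodup br ih

theorem iter_sub_keys (br : List (String × List (String × Int))) {S : List String}
    (h : S ⊆ br.map Prod.fst) : ∀ k, (pvGrowC br)^[k] S ⊆ br.map Prod.fst := by
  intro k
  induction k with
  | zero => simpa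
  | succ k ih => rw [Function.iterate_succ_apply']; exact grow_sub_keys br ih

theorem grow_ne_len (br : List (String × List (String × Int))) {S : List String}
    (h : pvGrowC br S ≠ S) : S.length + 1 ≤ (pvGrowC br S).length := by
  have he : pvGrowC br S = S ++ (PySem.Set.ofList (pvStepC br S)).filter
      (fun y => !(PySem.Set.contains S y)) := PySem.Set.update_eq_append_filter ..
  rcases hr : (PySem.Set.ofList (pvStepC br S)).filter (fun y => !(PySem.Set.contains S y)) with _ | ⟨x, rest⟩
  · exact absurd (by rw [he, hr, List.append_nil]) h
  · rw [he, hr]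
    simp

theorem iter_len_grow (br : List (String × List (String × Int))) (S : List String) :
    ∀ n, (∀ k < n, (pvGrowC br)^[k+1] S ≠ (pvGrowC br)^[k] S) →
      S.length + n ≤ ((pvGrowC br)^[n] S).length := by
  intro n
  induction n with
  | zero => intro _; simp
  | succ n ih =>
    intro h
    have h1 := ih (fun k hk => h k (by omega))
    have h2 : (pvGrowC br)^[n+1] S ≠ (pvGrowC br)^[n] S := h n (by omega)
    rw [Function.iterate_succ_apply'] at h2 ⊢
    have := grow_ne_len br h2
    omega

theorem closure_fixed (br : List (String × List (String × Int))) {S : List String}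
    (hnd : S.Nodup) (hsk : S ⊆ br.map Prod.fst) :
    pvGrowC br (pvClosureC br S) = pvClosureC br S := by
  have hex : ∃ k < br.length + 1, (pvGrowC br)^[k+1] S = (pvGrowC br)^[k] S := by
    by_contra hc
    push Not at hc
    have h1 := iter_len_grow br S (br.length + 1) hc
    have h2 : ((pvGrowC br)^[br.length + 1] S).length ≤ br.length := by
      have := List.Subperm.length_le
        ((iter_nodup br hnd (br.length + 1)).subperm (iter_sub_keys br hsk (br.length + 1)))
      simpa using this
    omega
  obtain ⟨k, hklt, hkeq⟩ := hex
  rw [Function.iterate_succ_apply'] at hkeq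
  have hfix : ∀ j, (pvGrowC br)^[j] ((pvGrowC br)^[k] S) = (pvGrowC br)^[k] S :=
    fun j => Function.iterate_fixed hkeq j
  have hC : pvClosureC br S = (pvGrowC br)^[k] S := by
    unfold pvClosureC
    rw [show br.length + 1 = (br.length + 1 - k) + k by omega, Function.iterate_add_apply]
    exact hfix _
  rw [hC, ← Function.iterate_one (pvGrowC br)]
  exact hfix 1

theorem closure_closed (br : List (String × List (String × Int))) {S : List String}
    (hnd : S.Nodup) (hsk : S ⊆ br.map Prod.fst) (hk : (br.map Prod.fst).Nodup)
    {b : String} (hb : b ∈ pvClosureC br S) :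
    getOuterBags br b ⊆ pvClosureC br S := by
  rw [← step_singleton]
  intro x hx
  have : x ∈ pvStepC br (pvClosureC br S) :=
    step_mono br (by intro y hy; simp only [List.mem_singleton] at hy; subst hy; exact hb) hx
  have := step_sub_grow br _ this
  rwa [closure_fixed br hnd hsk] at this

theorem closure_trans_sub (br : List (String × List (String × Int))) {S T : List String}
    (hnd : S.Nodup) (hsk : S ⊆ br.map Prod.fst) (hk : (br.map Prod.fst).Nodup)
    (hT : T ⊆ pvClosureC br S) : pvClosureC br T ⊆ pvClosureC br S := by
  have hstep : pvStepC br (pvClosureC br S) ⊆ pvClosureC br S := by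
    intro x hx
    have := step_sub_grow br _ hx
    rwa [closure_fixed br hnd hsk] at this
  have : ∀ j, (pvGrowC br)^[j] T ⊆ pvClosureC br S := by
    intro j
    induction j with
    | zero => simpa
    | succ j ih =>
      rw [Function.iterate_succ_apply']
      intro x hx
      rcases (PySem.Set.mem_update _ _ _).mp hx with hx | hx
      · exact ih hx
      · exact hstep (step_mono br ih hx)
  exact this _

-- chain lemmas
theorem relC_of_relOut (br : List (String × List (String × Int))) {a b : String}
    (h : RelOut br a b) : RelC br a b := closure_seed br _ h

theorem relC_trans (br : List (String × List (String × Int))) (hk : (br.map Prod.fst).Nodup)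
    {a b c : String} (hab : RelC br a b) (hbc : RelC br b c) : RelC br a c := by
  have hnd : (getOuterBags br a).Nodup := List.Nodup.sublist (g_sublist_keys br a) hk
  have hga : getOuterBags br b ⊆ pvClosureC br (getOuterBags br a) :=
    closure_closed br hnd (g_subset_keys br a) hk hab
  exact closure_trans_sub br hnd (g_subset_keys br a) hk hga hbc

theorem chain_snoc {α : Type} {r : α → α → Prop} :
    ∀ (xs : List α) (x y z : α), List.IsChain r (x :: (xs ++ [y])) → r y z →
      List.IsChain r (x :: (xs ++ [y, z])) := by
  intro xs
  induction xs with
  | nil =>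
    intro x y z h hz
    simp only [List.nil_append] at h ⊢
    rw [List.isChain_cons_cons] at h ⊢
    exact ⟨h.1, List.isChain_cons_cons.mpr ⟨hz, List.IsChain.singleton z⟩⟩
  | cons a xs ih =>
    intro x y z h hz
    simp only [List.cons_append, List.isChain_cons_cons] at h ⊢
    exact ⟨h.1, ih a y z h.2 hz⟩

theorem chain_of_mem_iter (br : List (String × List (String × Int))) (t : String) :
    ∀ (k : Nat) (a : String), a ∈ (fun s => s.flatMap (getOuterBags br))^[k] (getOuterBags br t) →
      ∃ l : List String, List.IsChain (RelOut br) (t :: (l ++ [a])) ∧ l.length = k := by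
  intro k
  induction k with
  | zero =>
    intro a ha
    simp only [Function.iterate_zero, id] at ha
    refine ⟨[], ?_, rfl⟩
    simp only [List.nil_append]
    exact List.isChain_pair.mpr ha
  | succ k ih =>
    intro a ha
    rw [Function.iterate_succ_apply'] at ha
    simp only [List.mem_flatMap] at ha
    obtain ⟨b, hb, hab⟩ := ha
    obtain ⟨l, hchain, hlen⟩ := ih b hb
    refine ⟨l ++ [b], ?_, by simp [hlen]⟩
    have := chain_snoc l t b a hchain hab
    simpa using this

theorem chain_mem_keys (br : List (String × List (String × Int))) :
    ∀ (l : List String) (t : String), List.IsChain (RelOut br) (t :: l) →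
      ∀ x ∈ l, x ∈ br.map Prod.fst := by
  intro l
  induction l with
  | nil => intro t _ x hx; simp at hx
  | cons b l' ih =>
    intro t h x hx
    rw [List.isChain_cons_cons] at h
    rcases List.mem_cons.mp hx with hx | hx
    · subst hx; exact g_subset_keys br t h.1
    · exact ih b h.2 x hx

-- Pairwise to Nodup using a per-element fact (specific to our acyclicity argument)
theorem nodup_of_pairwise_relC (br : List (String × List (String × Int))) (t : String)
    (h3' : ∀ c ∈ pvClosureC br (getOuterBags br t), c ∉ pvClosureC br (getOuterBags br c)) :
    ∀ (l : List String), List.Pairwise (RelC br) l → (∀ x ∈ l, RelC br t x) → l.Nodup := by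
  intro l
  induction l with
  | nil => intro _ _; exact List.nodup_nil
  | cons b l' ih =>
    intro h hm
    rw [List.pairwise_cons] at h
    rw [List.nodup_cons]
    refine ⟨?_, ih h.2 (fun x hx => hm x (List.mem_cons_of_mem _ hx))⟩
    intro hbm
    have hbb : RelC br b b := h.1 b hbm
    exact h3' b (hm b List.mem_cons_self) hbb

theorem levels_die (br : List (String × List (String × Int))) (t : String)
    (h1 : (br.map Prod.fst).Nodup)
    (h3 : ∀ c ∈ pvClosureC br (pvStepC br [t]), c ∉ pvClosureC br (pvStepC br [c])) :
    (fun s => s.flatMap (getOuterBags br))^[br.length + 1] (getOuterBags br t) = [] := by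
  rw [List.eq_nil_iff_forall_not_mem]
  intro a ha
  obtain ⟨l, hchain, hlen⟩ := chain_of_mem_iter br t (br.length + 1) a ha
  have h3' : ∀ c ∈ pvClosureC br (getOuterBags br t), c ∉ pvClosureC br (getOuterBags br c) := by
    intro c hc
    rw [← step_singleton br c]
    exact h3 c (by rwa [step_singleton br t])
  have hchainC : List.IsChain (RelC br) (t :: (l ++ [a])) :=
    List.IsChain.imp (fun x y h => relC_of_relOut br h) hchain
  haveI : Trans (RelC br) (RelC br) (RelC br) := ⟨fun hab hbc => relC_trans br h1 hab hbc⟩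
  have hpw : List.Pairwise (RelC br) (t :: (l ++ [a])) := List.isChain_iff_pairwise.mp hchainC
  rw [List.pairwise_cons] at hpw
  have hnd : (l ++ [a]).Nodup := nodup_of_pairwise_relC br t h3' (l ++ [a]) hpw.2 hpw.1
  have hsub : (l ++ [a]) ⊆ br.map Prod.fst := chain_mem_keys br (l ++ [a]) t hchain
  have hle := List.Subperm.length_le (hnd.subperm hsub)
  simp [hlen] at hle

-- ===== VERDICT (by name: the statement is the Claim_ definition above) =====
theorem loop_exhaustive_outer_spec : Claim_equal_loop_exhaustive_outer := by
  intro br target _ hpre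
  obtain ⟨h1, h2, h3⟩ := hpre
  unfold Spec_loop_exhaustive_outer loop_exhaustive_outer loop_exhaustive_outer_alt
  have hidx : ∀ b, (buildIndex br).getD b [] = getOuterBags br b :=
    fun b => buildIndex_getD br b h2
  have hg : (fun b => (buildIndex br).getD b []) = getOuterBags br := funext hidx
  rw [pyLoopA_eq_levcat, pyLoopB_eq_appended, hidx, hg, List.drop_zero, List.nil_append]
  exact (appended_eq_levcat (getOuterBags br) (br.length + 1) (br.length + 1) _ _
    (levels_die br target h1 h3) le_rfl
    (by
      calc totalLen (getOuterBags br) (br.length + 1) (getOuterBags br target)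
          ≤ (br.length + 1) * (getOuterBags br target).length * (br.length + 1) ^ (br.length + 1) :=
            totalLen_le br _ _
        _ ≤ (br.length + 1) ^ (br.length + 3) := by
            have hg : (getOuterBags br target).length ≤ br.length + 1 := by
              unfold getOuterBags
              have := List.length_filter_le (fun p => ((PySem.Dict.mk p.2).getD target 0) != 0) br
              simpa using Nat.le_succ_of_le this
            calc (br.length + 1) * (getOuterBags br target).length * (br.length + 1) ^ (br.length + 1)
                ≤ (br.length + 1) * (br.length + 1) * (br.length + 1) ^ (br.length + 1) :=
                  Nat.mul_le_mul_right _ (Nat.mul_le_mul_left _ hg)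
              _ = (br.length + 1) ^ (br.length + 3) := by ring)).symm
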